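-- pv_equiv track=rewrite | github.com/brandonhostetter/WordGame | src/generator.py | findWordPairs
-- ===== SOURCE A (Python) =====
-- def listWithExactLength(words, exactLength):
--     return [word for word in words if len(word) == exactLength]
--
-- def findLettersInWord(word):
--     """
--     Take a word return a dictionary where each key is a letter in the word and
--     each value is the number of times that letter appears in the word.
--
--     Args:
--         word
--
--     Returns:
--         letters: dict of letter frequency found in 'word'
--     """
--     letters = {}
--
--     for char in word:
--         if char in letters:
--             letters[char] = letters[char] + 1
--         else:
--             letters[char] = 1
--     return letters
--
-- def findWordPairs(words, wordLength, matchesMinLength):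
--     """
--     First, get a list of words that are the exact length of 'wordLength'. This
--     will be the list of words we get a list of letters from (we want this list
--     to be sufficiently large so we have a decent pool of letters to build other
--     words from). Next, loop over each word in this new list and get a list of
--     words from 'words' that can be constructed with just the letters provided
--     in the word from 'wordsWithExactLength'.
--
--     Args:
--         words: list of all words
--         wordLength: the length we want each word in 'words' to be when we
--             search for letters in it
--         matchesMinLength: the minimum length of the list of words that can
--             be constructed with a given set of letters
--
--     Returns:
--         possibleWords: the list of lists containing words that can be
--             constructed with some set of letters
--         possibleWordsLetters: the list of dicts containing the letters
--             used to construct the words in the cooresponding index of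
--             'possibleWords'
--     """
--     wordsWithExactLength = listWithExactLength(words, wordLength)
--     possibleWords = []
--     possibleWordsLetters = []
--
--     for index, word in enumerate(wordsWithExactLength):
--         letters = findLettersInWord(wordsWithExactLength[index])
--         possEntry = findWordsMadeFromLetters(words, letters)
--         if len(possEntry) >= matchesMinLength:
--             possibleWords.append(possEntry)
--             possibleWordsLetters.append(letters)
--
--     return possibleWords, possibleWordsLetters
--
-- def findWordsMadeFromLetters(words, letters):
--     possWords = []
--
--     for word in words:
--         copy = letters.copy()
--         validWord = True
--
--         for char in word:
--             if char not in copy: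
--                 validWord = False
--                 break
--             copy[char] = copy[char] - 1
--             if copy[char] < 0:
--                 validWord = False
--                 break
--
--         if validWord:
--             possWords.append(word)
--     return possWords
-- ===== SOURCE B (Python) =====
-- def _letterCounts(word):
--     counts = {}
--     for c in word:
--         counts[c] = counts.get(c, 0) + 1
--     return counts
--
-- def findWordPairs(words, wordLength, matchesMinLength):
--     # Precompute each word's letter-frequency dict once, then select by
--     # direct frequency-dict containment instead of re-scanning letters per pair.
--     freqs = [_letterCounts(w) for w in words]
--     possibleWords = []
--     possibleWordsLetters = []
--     for word, freq in zip(words, freqs):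
--         if len(word) != wordLength:
--             continue
--         entry = [w for w, wf in zip(words, freqs)
--                  if all(freq.get(c, 0) >= n for c, n in wf.items())]
--         if len(entry) >= matchesMinLength:
--             possibleWords.append(entry)
--             possibleWordsLetters.append(freq)
--     return possibleWords, possibleWordsLetters
-- ===== Notes on version B (the rewrite author's own statement) =====
-- stated objective: alternative
-- what changed: B precomputes one letter-frequency dict per word in a single upfront pass and selects buildable words by direct frequency-dict containment (each needed letter's count <= the reference's count), replacing A's per-(reference,word) mutate-a-copy letter rescan with early breaks; it trades A's early-exit char scan for precomputed dict comparisons.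
import Mathlib
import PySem

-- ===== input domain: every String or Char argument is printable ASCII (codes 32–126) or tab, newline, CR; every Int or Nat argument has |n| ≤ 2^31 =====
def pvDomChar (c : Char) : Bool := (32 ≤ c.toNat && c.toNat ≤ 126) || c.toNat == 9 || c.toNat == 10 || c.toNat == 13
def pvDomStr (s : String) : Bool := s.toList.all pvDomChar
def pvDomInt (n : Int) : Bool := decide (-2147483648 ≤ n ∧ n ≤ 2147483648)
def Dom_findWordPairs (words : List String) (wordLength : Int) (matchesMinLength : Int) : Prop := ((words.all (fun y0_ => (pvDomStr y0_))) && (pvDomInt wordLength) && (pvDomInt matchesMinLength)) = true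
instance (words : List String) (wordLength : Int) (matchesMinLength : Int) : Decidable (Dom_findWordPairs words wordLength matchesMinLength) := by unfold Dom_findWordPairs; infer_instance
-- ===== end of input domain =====

-- B precomputes every word's letter-frequency dict ONCE and selects words by direct
-- frequency-dict containment, instead of A's per-pair mutate-a-copy letter scan (objective: alternative).

-- ===== PORT A =====

def listWithExactLength (words : List String) (exactLength : Int) : List String :=
  words.filter (fun word => (PySem.Str.len word : Int) == exactLength)

def findLettersInWord (word : String) : PySem.Dict String Int :=
  word.toList.foldl (fun letters ch =>
    if letters.contains (String.ofList [ch]) then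
      letters.insert (String.ofList [ch]) (letters.getD (String.ofList [ch]) 0 + 1)
    else
      letters.insert (String.ofList [ch]) 1) PySem.Dict.empty

-- the inner 'for char in word' loop of findWordsMadeFromLetters, with its two 'break's
def checkWordChars : List Char → PySem.Dict String Int → Bool
  | [], _ => true
  | ch :: rest, copy =>
    if copy.contains (String.ofList [ch]) then
      let copy' := copy.insert (String.ofList [ch]) (copy.getD (String.ofList [ch]) 0 - 1)
      if copy'.getD (String.ofList [ch]) 0 < 0 then false
      else checkWordChars rest copy'
    else false

def findWordsMadeFromLetters (words : List String) (letters : PySem.Dict String Int) : List String :=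
  words.foldl (fun possWords word =>
    if checkWordChars word.toList letters then possWords ++ [word] else possWords) []

-- 'enumerate' note: A reads wordsWithExactLength[index], which is exactly the loop word
def findWordPairs (words : List String) (wordLength : Int) (matchesMinLength : Int) : List (List String) × (List (List (String × Int))) :=
  let wordsWithExactLength := listWithExactLength words wordLength
  wordsWithExactLength.foldl (fun acc word =>
    let letters := findLettersInWord word
    let possEntry := findWordsMadeFromLetters words letters
    if matchesMinLength ≤ (possEntry.length : Int) then
      (acc.1 ++ [possEntry], acc.2 ++ [letters.items])
    else acc) ([], [])

-- ===== PORT B =====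

def letterCounts (word : String) : PySem.Dict String Int :=
  word.toList.foldl (fun counts c =>
    counts.insert (String.ofList [c]) (counts.getD (String.ofList [c]) 0 + 1)) PySem.Dict.empty

-- all(freq.get(c, 0) >= n for c, n in wf.items())
def fitsIn (freq wf : PySem.Dict String Int) : Bool :=
  wf.items.all (fun p => decide (p.2 ≤ freq.getD p.1 0))

def findWordPairs_alt (words : List String) (wordLength : Int) (matchesMinLength : Int) : List (List String) × (List (List (String × Int))) :=
  let freqs := words.map letterCounts
  (words.zip freqs).foldl (fun acc wp =>
    if (PySem.Str.len wp.1 : Int) ≠ wordLength then acc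
    else
      let entry := ((words.zip freqs).filter (fun q => fitsIn wp.2 q.2)).map (·.1)
      if matchesMinLength ≤ (entry.length : Int) then
        (acc.1 ++ [entry], acc.2 ++ [wp.2.items])
      else acc) ([], [])

-- ===== PRECONDITION & SPEC =====
def Spec_findWordPairs (words : List String) (wordLength : Int) (matchesMinLength : Int) (out : List (List String) × (List (List (String × Int)))) : Prop := out = findWordPairs_alt words wordLength matchesMinLength
instance (words : List String) (wordLength : Int) (matchesMinLength : Int) (out : List (List String) × (List (List (String × Int)))) : Decidable (Spec_findWordPairs words wordLength matchesMinLength out) := by unfold Spec_findWordPairs; infer_instance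

-- ===== CLAIM (what is proved, stated in full; the proofs are below) =====
def Claim_equal_findWordPairs : Prop := ∀ (words : List String) (wordLength : Int) (matchesMinLength : Int), Dom_findWordPairs words wordLength matchesMinLength → Spec_findWordPairs words wordLength matchesMinLength (findWordPairs words wordLength matchesMinLength)

-- ===== LEMMAS AND PROOFS =====

theorem ofList_single_inj {a b : Char} (h : String.ofList [a] = String.ofList [b]) : a = b := by
  have := congrArg String.toList h; simp at this; exact this

theorem letters_eq (w : String) : findLettersInWord w = letterCounts w := by
  unfold findLettersInWord letterCounts
  apply PySem.List.foldl_congr_mem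
  intro letters ch _
  by_cases h : letters.contains (String.ofList [ch]) = true
  · simp [h]
  · simp only [Bool.not_eq_true] at h
    simp [h, PySem.Dict.getD_of_not_contains _ _ h]

theorem letterCounts_eq_counter (w : String) :
    letterCounts w = PySem.Dict.counter (w.toList.map (fun c => String.ofList [c])) := by
  unfold letterCounts
  rw [← PySem.Dict.foldl_insert_getD_add_one_eq_counter, List.foldl_map]

theorem checkWordChars_iff (cs : List Char) (ref : PySem.Dict String Int) :
    checkWordChars cs ref = true ↔
      ∀ c ∈ cs, (cs.count c : Int) ≤ ref.getD (String.ofList [c]) 0 := by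
  induction cs generalizing ref with
  | nil => simp [checkWordChars]
  | cons a cs ih =>
    by_cases hc : ref.contains (String.ofList [a]) = true
    · by_cases hv : ref.getD (String.ofList [a]) 0 - 1 < 0
      · have hck : checkWordChars (a :: cs) ref = false := by
          simp [checkWordChars, hc, PySem.Dict.getD_insert_self, hv]
        rw [hck]
        simp only [Bool.false_eq_true, false_iff]
        intro h
        have := h a (List.mem_cons_self)
        have hcnt : List.count a (a :: cs) = List.count a cs + 1 := by
          simp
        omega
      · have hck : checkWordChars (a :: cs) ref
            = checkWordChars cs (ref.insert (String.ofList [a]) (ref.getD (String.ofList [a]) 0 - 1)) := by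
          simp [checkWordChars, hc, PySem.Dict.getD_insert_self, hv]
        rw [hck, ih]
        constructor
        · intro h c hmem
          by_cases hca : c = a
          · subst hca
            have hcnt : List.count c (c :: cs) = List.count c cs + 1 := by
              simp
            by_cases hin : c ∈ cs
            · have := h c hin
              rw [PySem.Dict.getD_insert_self] at this
              omega
            · have h0 : List.count c cs = 0 := List.count_eq_zero_of_not_mem hin
              omega
          · have hcs : c ∈ cs := by
              rcases List.mem_cons.mp hmem with h' | h'
              · exact absurd h' hca
              · exact h'
            have heq : String.ofList [c] ≠ String.ofList [a] :=
              fun e => hca (ofList_single_inj e)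
            have := h c hcs
            rw [PySem.Dict.getD_insert_of_ne _ _ _ heq] at this
            have hcnt : List.count c (a :: cs) = List.count c cs := by
              simp [Ne.symm hca]
            omega
        · intro h c hcs
          by_cases hca : c = a
          · subst hca
            rw [PySem.Dict.getD_insert_self]
            have := h c (List.mem_cons_self)
            have hcnt : List.count c (c :: cs) = List.count c cs + 1 := by
              simp
            omega
          · have heq : String.ofList [c] ≠ String.ofList [a] :=
              fun e => hca (ofList_single_inj e)
            rw [PySem.Dict.getD_insert_of_ne _ _ _ heq]
            have := h c (List.mem_cons_of_mem a hcs)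
            have hcnt : List.count c (a :: cs) = List.count c cs := by
              simp [Ne.symm hca]
            omega
    · have hck : checkWordChars (a :: cs) ref = false := by
        simp [checkWordChars, hc]
      rw [hck]
      simp only [Bool.false_eq_true, false_iff]
      intro h
      have := h a (List.mem_cons_self)
      have h0 : ref.getD (String.ofList [a]) 0 = 0 := by
        exact PySem.Dict.getD_of_not_contains _ _ (by simpa using hc)
      have hcnt : List.count a (a :: cs) = List.count a cs + 1 := by
        simp
      omega

theorem fitsIn_eq_check (ref : PySem.Dict String Int) (w : String) :
    fitsIn ref (letterCounts w) = checkWordChars w.toList ref := by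
  rw [Bool.eq_iff_iff, checkWordChars_iff]
  rw [letterCounts_eq_counter]
  unfold fitsIn
  rw [PySem.Dict.items_counter]
  simp only [List.all_map, List.all_eq_true, Function.comp, decide_eq_true_eq]
  constructor
  · intro h c hmem
    have hk : String.ofList [c] ∈ PySem.Set.ofList (w.toList.map (fun c => String.ofList [c])) := by
      rw [PySem.Set.mem_ofList]
      exact List.mem_map_of_mem hmem
    have := h _ hk
    rwa [List.count_map_of_injective _ _ (fun a b => ofList_single_inj)] at this
  · intro h k hk
    rw [PySem.Set.mem_ofList] at hk
    rcases List.mem_map.mp hk with ⟨c, hc, rfl⟩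
    rw [List.count_map_of_injective _ _ (fun a b => ofList_single_inj)]
    exact h c hc

theorem entry_eq (words : List String) (ref : PySem.Dict String Int) :
    findWordsMadeFromLetters words ref
      = ((words.zip (words.map letterCounts)).filter (fun q => fitsIn ref q.2)).map (·.1) := by
  unfold findWordsMadeFromLetters
  rw [PySem.List.foldl_append_if_eq_filter]
  simp only [List.nil_append]
  induction words with
  | nil => simp
  | cons w ws ih =>
    simp only [List.map_cons, List.zip_cons_cons, List.filter_cons]
    rw [fitsIn_eq_check]
    by_cases h : checkWordChars w.toList ref = true
    · simp [h, ih]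
    · simp only [Bool.not_eq_true] at h
      simp [h, ih]

theorem main_eq (words : List String) (wordLength matchesMinLength : Int) :
    findWordPairs words wordLength matchesMinLength
      = findWordPairs_alt words wordLength matchesMinLength := by
  unfold findWordPairs findWordPairs_alt listWithExactLength
  rw [← PySem.List.foldl_if_eq_foldl_filter]
  -- both sides: a fold over an index of 'words'; B's zip-fold is a fold over 'words'
  have hzip : ∀ (ws : List String)
      (acc : List (List String) × (List (List (String × Int)))),
      (ws.zip (ws.map letterCounts)).foldl (fun acc wp =>
        if (PySem.Str.len wp.1 : Int) ≠ wordLength then acc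
        else
          let entry := ((words.zip (words.map letterCounts)).filter (fun q => fitsIn wp.2 q.2)).map (·.1)
          if matchesMinLength ≤ (entry.length : Int) then
            (acc.1 ++ [entry], acc.2 ++ [wp.2.items])
          else acc) acc
      = ws.foldl (fun acc word =>
          if ((PySem.Str.len word : Int) == wordLength) = true then
            let letters := findLettersInWord word
            let possEntry := findWordsMadeFromLetters words letters
            if matchesMinLength ≤ (possEntry.length : Int) then
              (acc.1 ++ [possEntry], acc.2 ++ [letters.items])
            else acc
          else acc) acc := by
    intro ws
    induction ws with
    | nil => intro acc; simp
    | cons w rest ih =>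
      intro acc
      simp only [List.map_cons, List.zip_cons_cons, List.foldl_cons]
      rw [ih]
      congr 1
      by_cases hl : (PySem.Str.len w : Int) = wordLength
      · rw [if_neg (show ¬((PySem.Str.len w : Int) ≠ wordLength) from fun hne => hne hl),
            if_pos (show ((PySem.Str.len w : Int) == wordLength) = true from beq_iff_eq.mpr hl)]
        simp only [letters_eq, entry_eq]
      · rw [if_pos (show (PySem.Str.len w : Int) ≠ wordLength from hl),
            if_neg (show ¬(((PySem.Str.len w : Int) == wordLength) = true) from fun hb => hl (beq_iff_eq.mp hb))]
  rw [hzip]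

-- ===== VERDICT (by name: the statement is the Claim_ definition above) =====
theorem findWordPairs_spec : Claim_equal_findWordPairs := by
  intro words wordLength matchesMinLength _
  unfold Spec_findWordPairs
  exact main_eq words wordLength matchesMinLength
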